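-- pv_equiv track=rewrite | github.com/Abdelrehim2001/Lumina | backend/App.py | decode_to_arabic
-- ===== SOURCE A (Python) =====
-- CHAR_MAPPING = {
--     'a': 'أ',
--     'aa': 'ع',
--     'b': 'ب',
--     'd': 'د',
--     'f': 'ف',
--     'g': 'ج',
--     'h': 'ه',
--     'k': 'ك',
--     'l': 'ل',
--     'm': 'م',
--     'n': 'ن',
--     'r': 'ر',
--     's': 'س',
--     'ss': 'ص',
--     't': 'ط',
--     'w': 'و',
--     'y': 'ي',
--     # Numbers stay the same
--     '1': '١',
--     '2': '٢',
--     '3': '٣',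
--     '4': '٤',
--     '5': '٥',
--     '6': '٦',
--     '7': '٧',
--     '8': '٨',
--     '9': '٩',
--     '0': '٠'
-- }
--
-- def decode_to_arabic(detected_text):
--     """
--     Convert detected English characters to Arabic characters.
--
--     Args:
--         detected_text: String of detected characters in English format
--
--     Returns:
--         Arabic text string
--     """
--     # Split by common separators or process character by character
--     result = []
--     i = 0
--     text_lower = detected_text.lower()
--
--     while i < len(text_lower):
--         # Check for two-character combinations first (aa, ss)
--         if i < len(text_lower) - 1:
--             two_char = text_lower[i:i+2]
--             if two_char in CHAR_MAPPING:
--                 result.append(CHAR_MAPPING[two_char])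
--                 i += 2
--                 continue
--
--         # Check for single character
--         single_char = text_lower[i]
--         if single_char in CHAR_MAPPING:
--             result.append(CHAR_MAPPING[single_char])
--         else:
--             # Keep original character if not in mapping (for special cases)
--             result.append(detected_text[i])
--         i += 1
--
--     return ''.join(result)
-- ===== SOURCE B (Python) =====
-- CHAR_MAPPING = {
--     'a': 'أ',
--     'aa': 'ع',
--     'b': 'ب',
--     'd': 'د',
--     'f': 'ف',
--     'g': 'ج',
--     'h': 'ه',
--     'k': 'ك',
--     'l': 'ل',
--     'm': 'م',
--     'n': 'ن',
--     'r': 'ر',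
--     's': 'س',
--     'ss': 'ص',
--     't': 'ط',
--     'w': 'و',
--     'y': 'ي',
--     '1': '١',
--     '2': '٢',
--     '3': '٣',
--     '4': '٤',
--     '5': '٥',
--     '6': '٦',
--     '7': '٧',
--     '8': '٨',
--     '9': '٩',
--     '0': '٠'
-- }
--
--
-- def decode_to_arabic(detected_text):
--     """Convert detected English characters to Arabic characters.
--
--     One-pass state machine: instead of indexing with lookahead, carry the
--     previous doublable letter ('a' or 's') as pending state and resolve it
--     when the next character arrives (or at the end of the text).
--     """
--     out = []
--     pending = None  # a lowered 'a' or 's' waiting to see if it is doubled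
--     for ch in detected_text:
--         low = ch.lower()
--         if pending is not None:
--             if low == pending:
--                 out.append(CHAR_MAPPING[pending + pending])
--                 pending = None
--                 continue
--             out.append(CHAR_MAPPING[pending])
--             pending = None
--         if low in ('a', 's'):
--             pending = low
--         elif low in CHAR_MAPPING:
--             out.append(CHAR_MAPPING[low])
--         else:
--             out.append(ch)
--     if pending is not None:
--         out.append(CHAR_MAPPING[pending])
--     return ''.join(out)
-- ===== Notes on version B (the rewrite author's own statement) =====
-- stated objective: alternative
-- what changed: Replaces A's index-based while loop over a pre-lowercased copy with greedy two-character lookahead slicing by a single for-each state machine that carries the pending doublable letter ('a'/'s') and resolves it on the next character or at the end.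
import Mathlib
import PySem

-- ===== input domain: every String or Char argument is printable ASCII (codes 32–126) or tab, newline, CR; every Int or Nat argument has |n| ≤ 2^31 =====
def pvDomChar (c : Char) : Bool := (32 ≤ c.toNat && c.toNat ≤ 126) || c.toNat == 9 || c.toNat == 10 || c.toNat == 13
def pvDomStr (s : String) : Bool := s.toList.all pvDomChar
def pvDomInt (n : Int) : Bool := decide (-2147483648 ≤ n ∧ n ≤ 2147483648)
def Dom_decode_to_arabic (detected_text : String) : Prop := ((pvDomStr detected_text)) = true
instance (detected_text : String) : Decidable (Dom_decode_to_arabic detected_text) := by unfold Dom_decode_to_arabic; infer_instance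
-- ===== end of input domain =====

-- B replaces A's index-with-lookahead scan by a one-pass state machine carrying the pending
-- doublable letter; same return value everywhere (objective: alternative/idiomatic).

-- ===== PORT A =====
-- CHAR_MAPPING, keys as lists of characters (Python str keys)
def charMapping : PySem.Dict (List Char) String :=
  PySem.Dict.ofList
    [ (['a'], "أ"), (['a','a'], "ع"), (['b'], "ب"), (['d'], "د"), (['f'], "ف"),
      (['g'], "ج"), (['h'], "ه"), (['k'], "ك"), (['l'], "ل"), (['m'], "م"),
      (['n'], "ن"), (['r'], "ر"), (['s'], "س"), (['s','s'], "ص"), (['t'], "ط"),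
      (['w'], "و"), (['y'], "ي"), (['1'], "١"), (['2'], "٢"), (['3'], "٣"),
      (['4'], "٤"), (['5'], "٥"), (['6'], "٦"), (['7'], "٧"), (['8'], "٨"),
      (['9'], "٩"), (['0'], "٠") ]

-- A's while loop: index i over text_lower, two-char greedy lookahead, pieces appended in order
def decodeLoopA (orig lowered : List Char) (i : Nat) : List String :=
  if _h : i < lowered.length then
    match (if i < lowered.length - 1 then
             PySem.Dict.get? charMapping
               (PySem.List.slice lowered (some (i : Int)) (some ((i : Int) + 2)))
           else none) with
    | some v => v :: decodeLoopA orig lowered (i + 2)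
    | none =>
        (match PySem.Dict.get? charMapping [lowered.getD i ' '] with
         | some v => v
         | none => String.ofList [orig.getD i ' ']) :: decodeLoopA orig lowered (i + 1)
  else []
termination_by lowered.length - i

def decode_to_arabic (detected_text : String) : String :=
  PySem.Str.join "" (decodeLoopA detected_text.toList (PySem.Chars.lower detected_text.toList) 0)

-- ===== PORT B =====
-- one loop iteration: resolve the pending letter against the current character
def decodeStepB (st : List String × Option Char) (ch : Char) : List String × Option Char :=
  let low := PySem.Chars.lowerChar ch
  let handle : List String → List String × Option Char := fun acc =>
    if low = 'a' ∨ low = 's' then (acc, some low)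
    else match PySem.Dict.get? charMapping [low] with
         | some v => (acc ++ [v], none)
         | none => (acc ++ [String.ofList [ch]], none)
  match st.2 with
  | some p =>
      if low = p then (st.1 ++ [(PySem.Dict.get? charMapping [p, p]).getD ""], none)
      else handle (st.1 ++ [(PySem.Dict.get? charMapping [p]).getD ""])
  | none => handle st.1

-- the trailing 'if pending is not None' flush
def flushB (st : List String × Option Char) : List String :=
  match st.2 with
  | some p => st.1 ++ [(PySem.Dict.get? charMapping [p]).getD ""]
  | none => st.1

def decode_to_arabic_alt (detected_text : String) : String :=
  PySem.Str.join "" (flushB (detected_text.toList.foldl decodeStepB ([], none)))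

-- ===== PRECONDITION & SPEC =====
def Spec_decode_to_arabic (detected_text : String) (out : String) : Prop := out = decode_to_arabic_alt detected_text
instance (detected_text : String) (out : String) : Decidable (Spec_decode_to_arabic detected_text out) := by unfold Spec_decode_to_arabic; infer_instance

-- ===== CLAIM (what is proved, stated in full; the proofs are below) =====
def Claim_equal_decode_to_arabic : Prop := ∀ (detected_text : String), Dom_decode_to_arabic detected_text → Spec_decode_to_arabic detected_text (decode_to_arabic detected_text)

-- ===== LEMMAS AND PROOFS =====

-- the list of pieces B still emits from suffix l, given pending state p?
def gB (p? : Option Char) (l : List Char) : List String :=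
  match l with
  | [] =>
      match p? with
      | some p => [(PySem.Dict.get? charMapping [p]).getD ""]
      | none => []
  | c :: cs =>
      let low := PySem.Chars.lowerChar c
      let tail : List String :=
        if low = 'a' ∨ low = 's' then gB (some low) cs
        else (match PySem.Dict.get? charMapping [low] with
              | some v => v
              | none => String.ofList [c]) :: gB none cs
      match p? with
      | some p =>
          if low = p then (PySem.Dict.get? charMapping [p, p]).getD "" :: gB none cs
          else (PySem.Dict.get? charMapping [p]).getD "" :: tail
      | none => tail

lemma foldB_eq (l : List Char) : ∀ (acc : List String) (p? : Option Char),
    flushB (l.foldl decodeStepB (acc, p?)) = acc ++ gB p? l := by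
  induction l with
  | nil =>
      intro acc p?
      cases p? <;> simp [flushB, gB]
  | cons c cs ih =>
      intro acc p?
      rw [List.foldl_cons]
      cases p? with
      | none =>
          simp only [decodeStepB, gB]
          by_cases h : PySem.Chars.lowerChar c = 'a' ∨ PySem.Chars.lowerChar c = 's'
          · simp [h, ih]
          · cases hg : PySem.Dict.get? charMapping [PySem.Chars.lowerChar c] <;>
              simp [h, ih]
      | some p =>
          simp only [decodeStepB, gB]
          by_cases hp : PySem.Chars.lowerChar c = p
          · simp [hp, ih]
          · by_cases h : PySem.Chars.lowerChar c = 'a' ∨ PySem.Chars.lowerChar c = 's'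
            · simp [hp, h, ih]
            · cases hg : PySem.Dict.get? charMapping [PySem.Chars.lowerChar c] <;>
                simp [hp, h, ih]

lemma get?_pair (x y : Char) :
    PySem.Dict.get? charMapping [x, y] =
      if x = 'a' ∧ y = 'a' then some "ع"
      else if x = 's' ∧ y = 's' then some "ص" else none := by
  by_cases h1 : x = 'a' ∧ y = 'a'
  · obtain ⟨hx, hy⟩ := h1; subst hx; subst hy; decide
  · by_cases h2 : x = 's' ∧ y = 's'
    · obtain ⟨hx, hy⟩ := h2; subst hx; subst hy
      rw [if_neg h1]; decide
    · rw [if_neg h1, if_neg h2]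
      cases hg : PySem.Dict.get? charMapping [x, y] with
      | none => rfl
      | some v =>
          exfalso
          have hm := PySem.Dict.mem_items_of_get?_eq_some charMapping hg
          have hit : charMapping.items =
            [ (['a'], "أ"), (['a','a'], "ع"), (['b'], "ب"), (['d'], "د"), (['f'], "ف"),
              (['g'], "ج"), (['h'], "ه"), (['k'], "ك"), (['l'], "ل"), (['m'], "م"),
              (['n'], "ن"), (['r'], "ر"), (['s'], "س"), (['s','s'], "ص"), (['t'], "ط"),
              (['w'], "و"), (['y'], "ي"), (['1'], "١"), (['2'], "٢"), (['3'], "٣"),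
              (['4'], "٤"), (['5'], "٥"), (['6'], "٦"), (['7'], "٧"), (['8'], "٨"),
              (['9'], "٩"), (['0'], "٠") ] := by decide
          rw [hit] at hm
          simp at hm
          tauto

lemma lower_eq_map (orig : List Char) :
    PySem.Chars.lower orig = orig.map PySem.Chars.lowerChar := by
  simp [PySem.Chars.lower]

lemma loopA_eq (orig : List Char) : ∀ (n i : Nat), orig.length ≤ i + n →
    decodeLoopA orig (PySem.Chars.lower orig) i = gB none (orig.drop i) := by
  intro n
  induction n with
  | zero =>
      intro i h
      rw [decodeLoopA]
      have hge : ¬ i < (PySem.Chars.lower orig).length := by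
        rw [lower_eq_map]; simp; omega
      rw [dif_neg hge, List.drop_eq_nil_of_le (by omega)]
      simp [gB]
  | succ n ih =>
      intro i h
      by_cases h1 : i < orig.length
      · have hlt : i < (PySem.Chars.lower orig).length := by
          rw [lower_eq_map]; simpa using h1
        rw [decodeLoopA, dif_pos hlt]
        have hdrop : orig.drop i = orig[i] :: orig.drop (i + 1) :=
          List.drop_eq_getElem_cons h1
        have hsingle : (PySem.Chars.lower orig).getD i ' ' = PySem.Chars.lowerChar orig[i] := by
          rw [lower_eq_map, List.getD_eq_getElem _ _ (by simpa using h1), List.getElem_map]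
        have horig : orig.getD i ' ' = orig[i] := List.getD_eq_getElem _ _ h1
        by_cases h2 : i + 1 < orig.length
        · have hcond : i < (PySem.Chars.lower orig).length - 1 := by
            rw [lower_eq_map]; simp; omega
          rw [if_pos hcond]
          have hdrop2 : orig.drop (i + 1) = orig[i + 1] :: orig.drop (i + 2) :=
            List.drop_eq_getElem_cons h2
          have hslice : PySem.List.slice (PySem.Chars.lower orig) (some (i : Int)) (some ((i : Int) + 2)) =
              [PySem.Chars.lowerChar orig[i], PySem.Chars.lowerChar orig[i + 1]] := by
            have hcast : ((i : Int) + 2) = (((i + 2 : Nat)) : Int) := by push_cast; ring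
            rw [hcast, PySem.List.slice_natCast, lower_eq_map, ← List.map_drop, hdrop, hdrop2,
              Nat.add_sub_cancel_left]
            rfl
          rw [hslice, get?_pair]
          by_cases hda : PySem.Chars.lowerChar orig[i] = 'a' ∧ PySem.Chars.lowerChar orig[i + 1] = 'a'
          · rw [if_pos hda]
            rw [ih (i + 2) (by omega), hdrop, hdrop2]
            simp [gB, hda.1, hda.2]; decide
          · rw [if_neg hda]
            by_cases hds : PySem.Chars.lowerChar orig[i] = 's' ∧ PySem.Chars.lowerChar orig[i + 1] = 's'
            · rw [if_pos hds]
              rw [ih (i + 2) (by omega), hdrop, hdrop2]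
              simp [gB, hds.1, hds.2]; decide
            · rw [if_neg hds]
              rw [hsingle, horig]
              by_cases has : PySem.Chars.lowerChar orig[i] = 'a' ∨ PySem.Chars.lowerChar orig[i] = 's'
              · rw [ih (i + 1) (by omega), hdrop, hdrop2]
                rcases has with ha | hs
                · have hne' : PySem.Chars.lowerChar orig[i + 1] ≠ 'a' := fun hc => hda ⟨ha, hc⟩
                  have hga : charMapping.get? ['a'] = some "أ" := by decide
                  rw [ha]
                  simp [gB, ha, hne', hga]
                · have hne' : PySem.Chars.lowerChar orig[i + 1] ≠ 's' := fun hc => hds ⟨hs, hc⟩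
                  have hgs : charMapping.get? ['s'] = some "س" := by decide
                  rw [hs]
                  simp [gB, hs, hne', hgs]
              · rw [ih (i + 1) (by omega), hdrop]
                push Not at has
                cases hg : PySem.Dict.get? charMapping [PySem.Chars.lowerChar orig[i]] <;>
                  simp [gB, has.1, has.2, hg]
        · have hcond : ¬ i < (PySem.Chars.lower orig).length - 1 := by
            rw [lower_eq_map]; simp; omega
          rw [if_neg hcond, hsingle, horig]
          have hnil : orig.drop (i + 1) = [] := List.drop_eq_nil_of_le (by omega)
          rw [ih (i + 1) (by omega), hdrop, hnil]
          by_cases has : PySem.Chars.lowerChar orig[i] = 'a' ∨ PySem.Chars.lowerChar orig[i] = 's'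
          · rcases has with ha | hs
            · have hga : charMapping.get? ['a'] = some "أ" := by decide
              rw [ha]; simp [gB, ha, hga]
            · have hgs : charMapping.get? ['s'] = some "س" := by decide
              rw [hs]; simp [gB, hs, hgs]
          · push Not at has
            cases hg : PySem.Dict.get? charMapping [PySem.Chars.lowerChar orig[i]] <;>
              simp [gB, has.1, has.2, hg]
      · rw [decodeLoopA]
        have hge : ¬ i < (PySem.Chars.lower orig).length := by
          rw [lower_eq_map]; simp; omega
        rw [dif_neg hge, List.drop_eq_nil_of_le (by omega)]
        simp [gB]

-- ===== VERDICT (by name: the statement is the Claim_ definition above) =====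
theorem decode_to_arabic_spec : Claim_equal_decode_to_arabic := by
  intro s _
  unfold Spec_decode_to_arabic decode_to_arabic decode_to_arabic_alt
  rw [foldB_eq, loopA_eq s.toList s.toList.length 0 (by omega)]
  simp
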